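-- pv_equiv track=rewrite | github.com/Faizanmedico/Python-Program-to-print-pattern-of-SULTAN | pro2.py | get_n_pattern
-- ===== SOURCE A (Python) =====
-- def get_n_pattern(n):
--     """Returns the 'N' pattern as a list of strings."""
--     pattern = []
--     for row in range(n):
--         line = ""
--         for col in range(n):
--             if col == 0 or col == n - 1 or row == col:
--                 line += "*"
--             else:
--                 line += " "
--         pattern.append(line)
--     return pattern
-- ===== SOURCE B (Python) =====
-- def get_n_pattern(n):
--     """Returns the 'N' pattern as a list of strings."""
--     pattern = []
--     for row in range(n):
--         line = [' '] * n
--         line[0] = '*'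
--         line[n - 1] = '*'
--         line[row] = '*'
--         pattern.append(''.join(line))
--     return pattern
-- ===== Notes on version B (the rewrite author's own statement) =====
-- stated objective: simpler
-- what changed: B replaces the per-column scan with its three branch tests by building a blank row of spaces and writing a star directly at the first column, the last column and the diagonal position.
import Mathlib
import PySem

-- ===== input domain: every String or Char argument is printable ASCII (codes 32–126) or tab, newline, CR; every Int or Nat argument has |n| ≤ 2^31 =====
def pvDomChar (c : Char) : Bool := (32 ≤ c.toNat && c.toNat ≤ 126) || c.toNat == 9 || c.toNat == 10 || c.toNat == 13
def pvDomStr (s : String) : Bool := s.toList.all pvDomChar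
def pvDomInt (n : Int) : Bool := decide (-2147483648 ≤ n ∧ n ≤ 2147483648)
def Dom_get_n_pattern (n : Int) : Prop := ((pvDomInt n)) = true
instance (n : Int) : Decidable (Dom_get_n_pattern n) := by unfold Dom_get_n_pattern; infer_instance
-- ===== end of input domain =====

-- B builds each row as a blank line of spaces and writes the three stars directly instead of scanning every column (simpler decomposition, same cost).


-- ===== PORT A =====
-- Line by line: pattern accumulator, inner loop over columns appending '*' or ' ' per branch.
def get_n_pattern (n : Int) : List String :=
  (PySem.List.pyRange 0 n 1).foldl (fun pattern row =>
    let line : List Char :=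
      (PySem.List.pyRange 0 n 1).foldl (fun line col =>
        if col = 0 ∨ col = n - 1 ∨ row = col then line ++ ['*'] else line ++ [' ']) []
    pattern ++ [String.ofList line]) []

-- ===== PORT B =====
-- B: blank row of n spaces, then three index writes; indices 0, n-1, row are all
-- nonnegative whenever the loop body runs (0 <= row < n), so .toNat is exact here.
def get_n_pattern_alt (n : Int) : List String :=
  (PySem.List.pyRange 0 n 1).foldl (fun pattern row =>
    let line : List Char :=
      (((List.replicate n.toNat ' ').set 0 '*').set (n - 1).toNat '*').set row.toNat '*'
    pattern ++ [String.ofList line]) []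

-- ===== PRECONDITION & SPEC =====
def Spec_get_n_pattern (n : Int) (out : List String) : Prop := out = get_n_pattern_alt n
instance (n : Int) (out : List String) : Decidable (Spec_get_n_pattern n out) := by unfold Spec_get_n_pattern; infer_instance

-- ===== CLAIM (what is proved, stated in full; the proofs are below) =====
def Claim_equal_get_n_pattern : Prop := ∀ (n : Int), Dom_get_n_pattern n → Spec_get_n_pattern n (get_n_pattern n)

-- ===== LEMMAS AND PROOFS =====

-- ===== VERDICT (by name: the statement is the Claim_ definition above) =====
-- For each admitted row, A's column scan equals B's three-write line.
lemma line_eq (n row : Int) (h0 : 0 ≤ row) (h1 : row < n) :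
    (PySem.List.pyRange 0 n 1).foldl (fun line col =>
        if col = 0 ∨ col = n - 1 ∨ row = col then line ++ ['*'] else line ++ [' ']) []
    = (((List.replicate n.toNat ' ').set 0 '*').set (n - 1).toNat '*').set row.toNat '*' := by
  have hfold :
      (PySem.List.pyRange 0 n 1).foldl (fun line col =>
          if col = 0 ∨ col = n - 1 ∨ row = col then line ++ ['*'] else line ++ [' ']) []
      = [] ++ (PySem.List.pyRange 0 n 1).map
          (fun col => if col = 0 ∨ col = n - 1 ∨ row = col then '*' else ' ') := by
    rw [← PySem.List.foldl_append_singleton_eq_map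
      (fun col => if col = 0 ∨ col = n - 1 ∨ row = col then '*' else ' ') _ []]
    apply PySem.List.foldl_congr_mem
    intro acc x _
    split_ifs <;> rfl
  rw [hfold, List.nil_append, PySem.List.pyRange_one]
  apply List.ext_getElem
  · simp
  · intro i hi1 hi2
    simp only [List.getElem_map, List.getElem_range, List.getElem_set,
      List.getElem_replicate]
    simp only [List.length_map, List.length_range] at hi1
    split_ifs <;> first | rfl | (exfalso; omega)

theorem get_n_pattern_spec : Claim_equal_get_n_pattern := by
  intro n _
  unfold Spec_get_n_pattern get_n_pattern get_n_pattern_alt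
  apply PySem.List.foldl_congr_mem
  intro pattern row hrow
  have h := (PySem.List.mem_pyRange_one.mp hrow)
  rw [line_eq n row h.1 h.2]
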